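-- pv_equiv track=rewrite | github.com/Greenwicher/Competitive-Programming | Google/Foobar 2017/level2-2.py | answer
-- ===== SOURCE A (Python) =====
-- def answer(s):
--     # your code here
--     size = len(s)
--     left = [0] * size
--     # left[i] represents the number of '<' after s[i] (excluded)
--     for i in range(size-1)[::-1]:
--         left[i] += left[i+1] + 1 * (s[i+1] == '<')
--     ans = 0
--     for i in range(size):
--         if s[i] == '>':
--             ans += left[i]
--     return 2 * ans
-- ===== SOURCE B (Python) =====
-- def answer(s):
--     gt = 0
--     acc = 0
--     for c in s:
--         if c == '>':
--             gt += 1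
--         elif c == '<':
--             acc += gt
--     return 2 * acc
-- ===== Notes on version B (the rewrite author's own statement) =====
-- stated objective: simpler
-- what changed: Replaced the suffix-count array and the two index loops by a single left-to-right pass that keeps a running count of '>' seen so far and adds it to an accumulator at each '<'.
import Mathlib
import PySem

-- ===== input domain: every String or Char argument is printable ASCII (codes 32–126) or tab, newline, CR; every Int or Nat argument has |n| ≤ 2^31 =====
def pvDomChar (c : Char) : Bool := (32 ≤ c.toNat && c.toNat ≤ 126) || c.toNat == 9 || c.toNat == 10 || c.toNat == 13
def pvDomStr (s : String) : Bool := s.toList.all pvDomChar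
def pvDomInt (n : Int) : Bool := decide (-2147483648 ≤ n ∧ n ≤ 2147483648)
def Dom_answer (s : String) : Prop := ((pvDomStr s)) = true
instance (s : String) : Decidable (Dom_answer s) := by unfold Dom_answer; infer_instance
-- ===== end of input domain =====

-- B replaces A's suffix-count array and two index loops by one left-to-right pass
-- with a running counter of closing brackets seen so far (simpler, O(1) extra space; measured faster by a constant factor).

-- ===== PORT A =====
-- s[i] is ported through the char list; 'range(size-1)[::-1]' is the reverse of the range.
def answer (s : String) : Int :=
  let cs := s.toList
  let size : Int := cs.length
  let left0 : List Int := List.replicate size.toNat 0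
  -- for i in range(size-1)[::-1]: left[i] += left[i+1] + 1 * (s[i+1] == '<')
  -- indices are in range here, so 'left[i] = …' is List.set and reads are pyGetD (exact).
  let left := ((PySem.List.pyRange 0 (size - 1) 1).reverse).foldl
    (fun l i => l.set i.toNat
      (PySem.List.pyGetD l i 0 +
        (PySem.List.pyGetD l (i + 1) 0 +
          (if PySem.List.pyGetD cs (i + 1) ' ' = '<' then 1 else 0)))) left0
  let ans := (PySem.List.pyRange 0 size 1).foldl
    (fun a i => if PySem.List.pyGetD cs i ' ' = '>' then a + PySem.List.pyGetD left i 0 else a) 0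
  2 * ans

-- ===== PORT B =====
def answer_alt (s : String) : Int :=
  let p := s.toList.foldl
    (fun (p : Int × Int) c =>
      if c = '>' then (p.1 + 1, p.2)
      else if c = '<' then (p.1, p.2 + p.1) else p) (0, 0)
  2 * p.2

-- ===== PRECONDITION & SPEC =====
def Spec_answer (s : String) (out : Int) : Prop := out = answer_alt s
instance (s : String) (out : Int) : Decidable (Spec_answer s out) := by unfold Spec_answer; infer_instance

-- ===== CLAIM (what is proved, stated in full; the proofs are below) =====
def Claim_equal_answer : Prop := ∀ (s : String), Dom_answer s → Spec_answer s (answer s)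

-- ===== LEMMAS AND PROOFS =====

/-- number of '<' in a char list, as an Int -/
def cntLt (cs : List Char) : Int := (cs.countP (fun c => c = '<') : Int)

/-- number of '>' in a char list, as an Int -/
def cntGt (cs : List Char) : Int := (cs.countP (fun c => c = '>') : Int)

/-- structural form of the crossing count: for each '>' add the '<'s after it -/
def recA : List Char → Int
  | [] => 0
  | c :: t => (if c = '>' then cntLt t else 0) + recA t

lemma cntLt_nil : cntLt [] = 0 := rfl

lemma cntLt_cons (c : Char) (t : List Char) :
    cntLt (c :: t) = (if c = '<' then 1 else 0) + cntLt t := by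
  by_cases h : c = '<' <;> simp [cntLt, List.countP_cons, h] <;> push_cast <;> ring

lemma cntGt_cons (c : Char) (t : List Char) :
    cntGt (c :: t) = (if c = '>' then 1 else 0) + cntGt t := by
  by_cases h : c = '>' <;> simp [cntGt, List.countP_cons, h] <;> push_cast <;> ring

/-- B's loop invariant. -/
lemma loopB (cs : List Char) : ∀ (g acc : Int),
    cs.foldl
      (fun (p : Int × Int) c =>
        if c = '>' then (p.1 + 1, p.2)
        else if c = '<' then (p.1, p.2 + p.1) else p) (g, acc)
    = (g + cntGt cs, acc + g * cntLt cs + recA cs) := by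
  induction cs with
  | nil => intro g acc; simp [cntGt, cntLt, recA]
  | cons c t ih =>
    intro g acc
    simp only [List.foldl_cons]
    by_cases h1 : c = '>'
    · rw [if_pos h1, ih, cntGt_cons, cntLt_cons, recA, if_pos h1,
        if_neg (by rw [h1]; decide)]
      refine Prod.ext ?_ ?_ <;> simp [h1] <;> ring
    · by_cases h2 : c = '<'
      · rw [if_neg h1, if_pos h2, ih, cntGt_cons, cntLt_cons, recA,
          if_neg h1, if_pos h2]
        refine Prod.ext ?_ ?_ <;> simp [h1, h2] <;> ring
      · rw [if_neg h1, if_neg h2, ih, cntGt_cons, cntLt_cons, recA,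
          if_neg h1, if_neg h2]
        refine Prod.ext ?_ ?_ <;> simp [h1, h2] <;> ring

lemma answer_alt_eq (s : String) : answer_alt s = 2 * recA s.toList := by
  simp [answer_alt, loopB]

/-- invariant of A's first (right-to-left) loop -/
lemma foldl_left_inv (cs : List Char) : ∀ (m : Nat), m + 1 ≤ cs.length →
    ∀ (l : List Int), l.length = cs.length →
    (∀ j : Nat, j < cs.length →
      l.getD j 0 = if m ≤ j then cntLt (cs.drop (j + 1)) else 0) →
    ∀ j : Nat, j < cs.length →
      (((PySem.List.pyRange 0 (m : Int) 1).reverse).foldl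
        (fun l i => l.set i.toNat
          (PySem.List.pyGetD l i 0 +
            (PySem.List.pyGetD l (i + 1) 0 +
              (if PySem.List.pyGetD cs (i + 1) ' ' = '<' then 1 else 0)))) l).getD j 0
      = cntLt (cs.drop (j + 1)) := by
  intro m
  induction m with
  | zero =>
    intro _ l _ hinv j hj
    simp only [Nat.cast_zero, PySem.List.pyRange_one_eq_nil (le_refl (0:Int)),
      List.reverse_nil, List.foldl_nil]
    have := hinv j hj
    simpa using this
  | succ m ih =>
    intro hm l hlen hinv j hj
    have hm' : ((m + 1 : Nat) : Int) = (m : Int) + 1 := by push_cast; ring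
    have hsplit : PySem.List.pyRange 0 ((m + 1 : Nat) : Int) 1
        = PySem.List.pyRange 0 (m : Int) 1 ++ [(m : Int)] := by
      rw [hm']
      exact PySem.List.pyRange_one_succ_right (by positivity)
    rw [hsplit, List.reverse_append]
    simp only [List.reverse_singleton, List.singleton_append, List.foldl_cons]
    -- the first processed index is m; compute the updated array
    have hmn : m + 1 < cs.length := hm
    have hmlt : m < cs.length := Nat.lt_of_succ_lt hmn
    have hc1 : ((m : Int) + 1) = ((m + 1 : Nat) : Int) := by push_cast; ring
    have hgm : PySem.List.pyGetD l (m : Int) 0 = l.getD m 0 :=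
      PySem.List.pyGetD_natCast l m 0
    have hgm1 : PySem.List.pyGetD l ((m : Int) + 1) 0 = l.getD (m + 1) 0 := by
      rw [hc1, PySem.List.pyGetD_natCast]
    have hcs : PySem.List.pyGetD cs ((m : Int) + 1) ' ' = cs.getD (m + 1) ' ' := by
      rw [hc1, PySem.List.pyGetD_natCast]
    have hvm : l.getD m 0 = 0 := by
      have := hinv m hmlt
      rw [if_neg (by omega)] at this; exact this
    have hvm1 : l.getD (m + 1) 0 = cntLt (cs.drop (m + 2)) := by
      have := hinv (m + 1) hmn
      rw [if_pos (le_refl _)] at this; exact this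
    have hdrop : cs.drop (m + 1) = cs.getD (m + 1) ' ' :: cs.drop (m + 2) := by
      rw [List.getD_eq_getElem cs ' ' hmn]
      exact List.drop_eq_getElem_cons hmn
    set v : Int := PySem.List.pyGetD l (m : Int) 0 +
        (PySem.List.pyGetD l ((m : Int) + 1) 0 +
          (if PySem.List.pyGetD cs ((m : Int) + 1) ' ' = '<' then 1 else 0)) with hv
    have hv' : v = cntLt (cs.drop (m + 1)) := by
      rw [hv, hgm, hgm1, hcs, hvm, hvm1, hdrop, cntLt_cons]; ring
    -- apply the IH to the updated array
    refine ih (by omega) (l.set (m : Int).toNat v) (by simpa using hlen) ?_ j hj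
    intro k hk
    rcases eq_or_ne k m with rfl | hne
    · have hkl : k < (l.set (k : Int).toNat v).length := by
        simpa [hlen] using hk
      rw [List.getD_eq_getElem _ _ hkl]
      simp only [Int.toNat_natCast]
      rw [List.getElem_set_self (by simpa [hlen] using hk)]
      rw [if_pos (le_refl _)]
      exact hv'
    · have hkl : k < (l.set (m : Int).toNat v).length := by
        simpa [hlen] using hk
      have hstep : ((l.set (m : Int).toNat v).getD k 0) = l.getD k 0 := by
        rw [List.getD_eq_getElem _ _ hkl,
            List.getD_eq_getElem _ _ (by rw [hlen]; exact hk)]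
        simp only [Int.toNat_natCast]
        exact List.getElem_set_ne (fun h => hne (h.symm)) _
      rw [hstep, hinv k hk]
      rcases Nat.lt_or_ge k m with hkm | hkm
      · rw [if_neg (by omega), if_neg (by omega)]
      · rw [if_pos (by omega), if_pos (by omega)]

/-- A's second loop, once the array reads are replaced by suffix counts. -/
lemma sumA (cs : List Char) : ∀ (a0 : Int),
    (PySem.List.pyRange 0 (cs.length : Int) 1).foldl
      (fun a i => if PySem.List.pyGetD cs i ' ' = '>' then
        a + cntLt (cs.drop (i.toNat + 1)) else a) a0
    = a0 + recA cs := by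
  induction cs with
  | nil => intro a0; simp [recA, PySem.List.pyRange_one_eq_nil]
  | cons c t ih =>
    intro a0
    have hlen : (((c :: t).length : Nat) : Int) = (t.length : Int) + 1 := by
      push_cast [List.length_cons]; ring
    rw [hlen, PySem.List.pyRange_one_cons (by positivity)]
    simp only [List.foldl_cons]
    have h0 : PySem.List.pyGetD (c :: t) (0 : Int) ' ' = c := by
      rw [show (0 : Int) = ((0 : Nat) : Int) from rfl, PySem.List.pyGetD_natCast]
      rfl
    have hshift : PySem.List.pyRange (0 + 1) ((t.length : Int) + 1) 1
        = (List.range t.length).map (fun k : Nat => (1 : Int) + (k : Int)) := by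
      rw [PySem.List.pyRange_one,
        show (((t.length : Int) + 1) - (0 + 1)).toNat = t.length from by omega]
      exact List.map_congr_left (fun k _ => by push_cast; ring)
    have htr : PySem.List.pyRange 0 ((t.length : Int)) 1
        = (List.range t.length).map (fun k : Nat => (0 : Int) + (k : Int)) := by
      rw [PySem.List.pyRange_one,
        show (((t.length : Int)) - 0).toNat = t.length from by omega]
    rw [hshift, List.foldl_map]
    have hinit : (if PySem.List.pyGetD (c :: t) (0 : Int) ' ' = '>' then
          a0 + cntLt ((c :: t).drop ((0 : Int).toNat + 1)) else a0)
        = (if c = '>' then a0 + cntLt t else a0) := by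
      rw [h0]
      rfl
    rw [hinit]
    have hbody : ∀ (a : Int), ∀ k ∈ List.range t.length,
        (if PySem.List.pyGetD (c :: t) ((1 : Int) + k) ' ' = '>' then
          a + cntLt ((c :: t).drop (((1 : Int) + k).toNat + 1)) else a)
        = (if PySem.List.pyGetD t ((0 : Int) + k) ' ' = '>' then
          a + cntLt (t.drop (((0 : Int) + k).toNat + 1)) else a) := by
      intro a k _
      have h1 : (1 : Int) + k = ((k + 1 : Nat) : Int) := by push_cast; ring
      have h2 : (0 : Int) + k = ((k : Nat) : Int) := by push_cast; ring
      rw [h1, h2, PySem.List.pyGetD_natCast, PySem.List.pyGetD_natCast]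
      have h3 : (((k + 1 : Nat) : Int)).toNat = k + 1 := by omega
      have h4 : (((k : Nat) : Int)).toNat = k := by omega
      rw [h3, h4]
      rfl
    have iht := ih (if c = '>' then a0 + cntLt t else a0)
    rw [htr, List.foldl_map] at iht
    rw [PySem.List.foldl_congr_mem (List.range t.length)
      (fun (a : Int) (k : Nat) =>
        if PySem.List.pyGetD (c :: t) ((1 : Int) + k) ' ' = '>' then
          a + cntLt ((c :: t).drop (((1 : Int) + k).toNat + 1)) else a)
      (fun (a : Int) (k : Nat) =>
        if PySem.List.pyGetD t ((0 : Int) + k) ' ' = '>' then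
          a + cntLt (t.drop (((0 : Int) + k).toNat + 1)) else a)
      (if c = '>' then a0 + cntLt t else a0) hbody, iht]
    simp only [recA]
    split_ifs <;> ring

lemma answer_eq (s : String) : answer s = 2 * recA s.toList := by
  by_cases h0 : s.toList = []
  · simp [answer, h0, recA, PySem.List.pyRange_one_eq_nil]
  · simp only [answer]
    set cs := s.toList with hcs
    have hpos : 1 ≤ cs.length := List.length_pos_of_ne_nil h0
    have hsz : (cs.length : Int) - 1 = ((cs.length - 1 : Nat) : Int) := by omega
    -- characterize the left array
    have hleft := foldl_left_inv cs (cs.length - 1) (by omega)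
      (List.replicate ((cs.length : Int)).toNat 0) (by simp)
      (by
        intro j hj
        have hrep : (List.replicate ((cs.length : Int)).toNat (0 : Int)).getD j 0 = 0 := by
          simp [List.getD_eq_getElem?_getD, List.getElem?_replicate]
          split_ifs <;> rfl
        rw [hrep]
        split_ifs with hji
        · have hj1 : j = cs.length - 1 := by omega
          subst hj1
          have : cs.drop (cs.length - 1 + 1) = [] := by
            apply List.drop_eq_nil_of_le; omega
          rw [this, cntLt_nil]
        · rfl)
    rw [hsz]
    simp only [Int.toNat_natCast] at hleft
    -- replace the array reads in the second loop
    have hcong := PySem.List.foldl_congr_mem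
      (PySem.List.pyRange 0 (cs.length : Int) 1)
      (fun a i => if PySem.List.pyGetD cs i ' ' = '>' then
          a + PySem.List.pyGetD
            (((PySem.List.pyRange 0 ((cs.length - 1 : Nat) : Int) 1).reverse).foldl
              (fun l i => l.set i.toNat
                (PySem.List.pyGetD l i 0 +
                  (PySem.List.pyGetD l (i + 1) 0 +
                    (if PySem.List.pyGetD cs (i + 1) ' ' = '<' then 1 else 0))))
              (List.replicate ((cs.length : Int)).toNat 0)) i 0 else a)
      (fun a i => if PySem.List.pyGetD cs i ' ' = '>' then
          a + cntLt (cs.drop (i.toNat + 1)) else a)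
      0
      (by
        intro a i hi
        have hmem := (PySem.List.mem_pyRange_one).1 hi
        have hin : i.toNat < cs.length := by omega
        have hcast : i = ((i.toNat : Nat) : Int) := by omega
        dsimp only
        rw [hcast]
        simp only [PySem.List.pyGetD_natCast, Int.toNat_natCast]
        rw [hleft i.toNat hin])
    rw [hcong, sumA]
    ring

-- ===== VERDICT (by name: the statement is the Claim_ definition above) =====
theorem answer_spec : Claim_equal_answer := by
  intro s _
  unfold Spec_answer
  rw [answer_eq, answer_alt_eq]
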